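-- pv_equiv track=rewrite | github.com/Bennyhwanggggg/Algorithm-and-Data-Structures-and-Coding-Challenges | Challenges/Deletion_distance.py | deletion_distance
-- ===== SOURCE A (Python) =====
-- def deletion_distance(str1, str2):
--   if not str1:
--     return len(str2)
--   if not str2:
--     return len(str1)
--   if str1[len(str1)- 1] == str2[len(str2)-1]:
--     return deletion_distance(str1[:-1], str2[:-1])
--   else:
--     return 1 + min(deletion_distance(str1[:-1], str2), deletion_distance(str1, str2[:-1]))
-- ===== SOURCE B (Python) =====
-- def deletion_distance(str1, str2):
--     # Bottom-up DP over prefix lengths with a rolling row: O(len(str1)*len(str2)).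
--     dp = list(range(len(str2) + 1))
--     for c in str1:
--         new = [dp[0] + 1]
--         for d, diag, left in zip(str2, dp, dp[1:]):
--             new.append(diag if c == d else 1 + min(new[-1], left))
--         dp = new
--     return dp[-1]
-- ===== Notes on version B (the rewrite author's own statement) =====
-- stated objective: faster
-- what changed: Replaced A's exponential two-way recursion on string suffixes with a bottom-up dynamic program over prefix lengths kept in a single rolling row.
import Mathlib
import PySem

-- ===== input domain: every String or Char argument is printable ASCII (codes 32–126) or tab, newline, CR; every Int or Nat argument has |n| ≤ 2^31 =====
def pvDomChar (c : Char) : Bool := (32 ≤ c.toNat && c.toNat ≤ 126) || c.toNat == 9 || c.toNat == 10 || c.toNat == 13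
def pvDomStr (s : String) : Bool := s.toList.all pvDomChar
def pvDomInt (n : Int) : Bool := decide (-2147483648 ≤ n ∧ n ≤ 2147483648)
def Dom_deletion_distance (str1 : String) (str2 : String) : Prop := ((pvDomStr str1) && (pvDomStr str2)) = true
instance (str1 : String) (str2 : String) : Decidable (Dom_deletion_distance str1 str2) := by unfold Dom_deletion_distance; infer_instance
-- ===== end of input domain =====

-- B replaces A's exponential two-way recursion on suffixes with a bottom-up DP over
-- prefix lengths kept in a single rolling row (objective: faster, asymptotic).

-- ===== PORT A =====
-- A's recursion: compare last characters, recurse on str[:-1] (dropLast).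
def ddA (xs ys : List Char) : Int :=
  if h1 : xs = [] then (ys.length : Int)
  else if h2 : ys = [] then (xs.length : Int)
  else if xs.getLast h1 = ys.getLast h2 then ddA xs.dropLast ys.dropLast
  else 1 + min (ddA xs.dropLast ys) (ddA xs ys.dropLast)
termination_by xs.length + ys.length
decreasing_by
  · have hx := List.length_pos_iff.mpr h1
    have hy := List.length_pos_iff.mpr h2
    simp [List.length_dropLast]; omega
  · have hx := List.length_pos_iff.mpr h1
    simp [List.length_dropLast]; omega
  · have hy := List.length_pos_iff.mpr h2
    simp [List.length_dropLast]; omega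

def deletion_distance (str1 : String) (str2 : String) : Int :=
  ddA str1.toList str2.toList

-- ===== PORT B =====
-- inner loop of Source B: `for d, diag, left in zip(str2, dp, dp[1:]): new.append(diag if c == d else 1 + min(new[-1], left))`
-- prev is new[-1], the previously appended entry.
def innerB (c : Char) : List Char → List Int → Int → List Int
  | d :: ys', diag :: left :: rest, prev =>
      let v := if c = d then diag else 1 + min prev left
      v :: innerB c ys' (left :: rest) v
  | _, _, _ => []

-- one iteration of Source B's outer loop: new = [dp[0] + 1] then the inner loop
def stepB (ys : List Char) (dp : List Int) (c : Char) : List Int :=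
  let h := dp.headI + 1
  h :: innerB c ys dp h

def ddB (xs ys : List Char) : Int :=
  let dp0 : List Int := (List.range (ys.length + 1)).map Int.ofNat
  (xs.foldl (stepB ys) dp0).getLast!

def deletion_distance_alt (str1 : String) (str2 : String) : Int :=
  ddB str1.toList str2.toList

-- ===== PRECONDITION & SPEC =====
def Spec_deletion_distance (str1 : String) (str2 : String) (out : Int) : Prop := out = deletion_distance_alt str1 str2
instance (str1 : String) (str2 : String) (out : Int) : Decidable (Spec_deletion_distance str1 str2 out) := by unfold Spec_deletion_distance; infer_instance

-- ===== CLAIM (what is proved, stated in full; the proofs are below) =====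
def Claim_equal_deletion_distance : Prop := ∀ (str1 : String) (str2 : String), Dom_deletion_distance str1 str2 → Spec_deletion_distance str1 str2 (deletion_distance str1 str2)

-- ===== LEMMAS AND PROOFS =====

-- rowFrom p u v = [ddA p u, ddA p (u++[v₀]), …, ddA p (u++v)]  — the DP row of A-values over
-- the prefixes of ys extending u; proof-only helper relating B's rows to A.
def rowFrom (p u : List Char) : List Char → List Int
  | [] => [ddA p u]
  | d :: v' => ddA p u :: rowFrom p (u ++ [d]) v'

theorem ddA_nil_left (ys : List Char) : ddA [] ys = (ys.length : Int) := by
  rw [ddA]; simp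

theorem ddA_nil_right (xs : List Char) : ddA xs [] = (xs.length : Int) := by
  rw [ddA]
  by_cases h : xs = [] <;> simp [h]

theorem ddA_concat (p q : List Char) (c d : Char) :
    ddA (p ++ [c]) (q ++ [d]) =
      if c = d then ddA p q else 1 + min (ddA p (q ++ [d])) (ddA (p ++ [c]) q) := by
  rw [ddA]
  simp

theorem rowFrom_cons (p u v : List Char) :
    rowFrom p u v = ddA p u :: (rowFrom p u v).tail := by
  cases v <;> simp [rowFrom]

theorem innerB_spec (c : Char) (p : List Char) :
    ∀ (v u : List Char),
      innerB c v (rowFrom p u v) (ddA (p ++ [c]) u) = (rowFrom (p ++ [c]) u v).tail := by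
  intro v
  induction v with
  | nil => intro u; simp [rowFrom, innerB]
  | cons d v' ih =>
      intro u
      rw [rowFrom, rowFrom_cons p (u ++ [d]) v', innerB]
      have hrec : (if c = d then ddA p u else 1 + min (ddA (p ++ [c]) u) (ddA p (u ++ [d])))
          = ddA (p ++ [c]) (u ++ [d]) := by
        rw [ddA_concat, min_comm]
      simp only [rowFrom, hrec]
      rw [← rowFrom_cons p (u ++ [d]) v', ih (u ++ [d])]
      rw [List.tail_cons, ← rowFrom_cons]

theorem stepB_spec (ys : List Char) (p : List Char) (c : Char) :
    stepB ys (rowFrom p [] ys) c = rowFrom (p ++ [c]) [] ys := by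
  have hhead : (rowFrom p [] ys).headI = ddA p [] := by
    rw [rowFrom_cons]; rfl
  have hlen : ddA p [] + 1 = ddA (p ++ [c]) [] := by
    rw [ddA_nil_right, ddA_nil_right]; simp
  unfold stepB
  show ((rowFrom p [] ys).headI + 1) :: innerB c ys (rowFrom p [] ys) ((rowFrom p [] ys).headI + 1)
      = rowFrom (p ++ [c]) [] ys
  rw [hhead, hlen, innerB_spec c p ys [], ← rowFrom_cons]

theorem foldl_stepB (ys : List Char) :
    ∀ (xs p : List Char), xs.foldl (stepB ys) (rowFrom p [] ys) = rowFrom (p ++ xs) [] ys := by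
  intro xs
  induction xs with
  | nil => intro p; simp
  | cons c xs' ih =>
      intro p
      simp only [List.foldl_cons, stepB_spec ys p c, ih (p ++ [c])]
      simp

theorem rowFrom_nil_left : ∀ (v u : List Char),
    rowFrom [] u v = (List.range (v.length + 1)).map (fun j => ((u.length + j : Nat) : Int)) := by
  intro v
  induction v with
  | nil => intro u; simp [rowFrom, ddA_nil_left]
  | cons d v' ih =>
      intro u
      rw [rowFrom, ih (u ++ [d])]
      apply List.ext_getElem
      · simp
      · intro i h1 h2
        rcases i with _ | i
        · simp [ddA_nil_left]
        · simp
          omega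

theorem getLast!_cons_ne (a : Int) (l : List Int) (h : l ≠ []) :
    (a :: l).getLast! = l.getLast! := by
  cases hx : l.getLast? with
  | none => exact absurd (List.getLast?_eq_none_iff.mp hx) h
  | some x => simp [List.getLast?_cons, hx]

theorem rowFrom_getLast : ∀ (v u p : List Char),
    (rowFrom p u v).getLast! = ddA p (u ++ v) := by
  intro v
  induction v with
  | nil => intro u p; simp [rowFrom]
  | cons d v' ih =>
      intro u p
      rw [rowFrom]
      have hne : rowFrom p (u ++ [d]) v' ≠ [] := by rw [rowFrom_cons]; simp
      rw [getLast!_cons_ne (ddA p u) _ hne, ih (u ++ [d]) p]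
      simp

theorem ddB_eq_ddA (xs ys : List Char) : ddB xs ys = ddA xs ys := by
  have h0 : (List.range (ys.length + 1)).map Int.ofNat = rowFrom [] [] ys := by
    rw [rowFrom_nil_left]
    apply List.ext_getElem
    · simp
    · intro i h1 h2; simp
  show (xs.foldl (stepB ys) ((List.range (ys.length + 1)).map Int.ofNat)).getLast! = ddA xs ys
  rw [h0, foldl_stepB ys xs [], List.nil_append, rowFrom_getLast ys [] xs]
  simp

-- ===== VERDICT (by name: the statement is the Claim_ definition above) =====
theorem deletion_distance_spec : Claim_equal_deletion_distance := by
  intro s1 s2 _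
  unfold Spec_deletion_distance deletion_distance deletion_distance_alt
  rw [ddB_eq_ddA]
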